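-- pv_equiv track=rewrite | github.com/nambroa/Algorithms-and-Data-Structures | strings/K_two_characters/algorithm.py | is_a_valid_t_string
-- ===== SOURCE A (Python) =====
-- def is_a_valid_t_string(string):
--     if len(string) < 2:
--         return False
--     first_char = string[0]
--     second_char = string[1]
--     if first_char != second_char:
--         for i in range(2, len(string)):
--             ith_char = string[i]
--             if i % 2 == 0 and ith_char != first_char:
--                 return False
--             elif i % 2 == 1 and ith_char != second_char:
--                 return False
--     else:
--         return False
--     return True
-- ===== SOURCE B (Python) =====
-- def is_a_valid_t_string(string):
--     n = len(string)
--     if n < 2 or string[0] == string[1]: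
--         return False
--     pattern = string[:2] * ((n + 1) // 2)
--     return string == pattern[:n]
-- ===== Notes on version B (the rewrite author's own statement) =====
-- stated objective: alternative
-- what changed: Instead of scanning the string with an index-parity loop and per-character branches, B constructs the expected alternating string wholesale (the first two characters repeated and truncated to the input length) and returns a single whole-string equality comparison.
import Mathlib
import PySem

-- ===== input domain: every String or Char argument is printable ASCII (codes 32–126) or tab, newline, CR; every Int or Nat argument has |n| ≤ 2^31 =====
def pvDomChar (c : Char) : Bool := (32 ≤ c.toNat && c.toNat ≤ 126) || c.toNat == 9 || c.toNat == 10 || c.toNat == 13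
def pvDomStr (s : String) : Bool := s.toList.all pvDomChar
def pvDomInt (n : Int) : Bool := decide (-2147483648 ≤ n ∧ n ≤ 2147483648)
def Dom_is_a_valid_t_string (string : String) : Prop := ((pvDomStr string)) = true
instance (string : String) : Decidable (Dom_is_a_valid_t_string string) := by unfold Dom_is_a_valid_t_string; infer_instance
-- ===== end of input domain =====

-- B replaces A's index-parity scan by constructing the expected alternating string
-- (first two chars repeated, truncated to the input length) and one equality comparison.

-- ===== PORT A =====
-- the 'for i in range(2, len(string))' loop with its two early 'return False' branches
def pvLoopA (l : List Char) (first second : Char) : List Int → Bool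
  | [] => true
  | i :: rest =>
    match PySem.List.pyGet? l i with
    | none => true  -- unreachable: range(2, len) indices are in bounds
    | some ith =>
      if PySem.Int.mod i 2 == 0 && ith != first then false
      else if PySem.Int.mod i 2 == 1 && ith != second then false
      else pvLoopA l first second rest

def is_a_valid_t_string (string : String) : Bool :=
  let l := string.toList
  if l.length < 2 then false
  else
    match PySem.List.pyGet? l 0, PySem.List.pyGet? l 1 with
    | some first, some second =>
      if first != second then
        pvLoopA l first second (PySem.List.pyRange 2 (l.length : Int) 1)
      else false
    | _, _ => false  -- unreachable: length ≥ 2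

-- ===== PORT B =====
def is_a_valid_t_string_alt (string : String) : Bool :=
  let l := string.toList
  let n := l.length
  match l with
  | a :: b :: _ =>   -- n < 2 or string[0] == string[1] → False
    if a == b then false
    else
      -- pattern = string[:2] * ((n+1)//2);  return string == pattern[:n]
      let pattern := (List.replicate ((n + 1) / 2) (l.take 2)).flatten
      l == pattern.take n
  | _ => false

-- ===== PRECONDITION & SPEC =====
def Spec_is_a_valid_t_string (string : String) (out : Bool) : Prop := out = is_a_valid_t_string_alt string
instance (string : String) (out : Bool) : Decidable (Spec_is_a_valid_t_string string out) := by unfold Spec_is_a_valid_t_string; infer_instance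

-- ===== CLAIM (what is proved, stated in full; the proofs are below) =====
def Claim_equal_is_a_valid_t_string : Prop := ∀ (string : String), Dom_is_a_valid_t_string string → Spec_is_a_valid_t_string string (is_a_valid_t_string string)

-- ===== LEMMAS AND PROOFS =====

-- common form both sides reduce to: the tail alternates, expecting x then y then x …
def pvChk : Char → Char → List Char → Bool
  | _, _, [] => true
  | x, y, c :: r => (c == x) && pvChk y x r

-- the ideal alternating list of length n starting x, y, x, …
def pvAlt : Nat → Char → Char → List Char
  | 0, _, _ => []
  | n + 1, x, y => x :: pvAlt n y x

-- B's truncated repeated pattern IS the ideal alternating list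
theorem pattern_take (k : Nat) : ∀ (n : Nat) (a b : Char), n ≤ 2 * k →
    ((List.replicate k [a, b]).flatten.take n) = pvAlt n a b := by
  induction k with
  | zero => intro n a b h; interval_cases n; rfl
  | succ m ih =>
    intro n a b h
    show ((a :: b :: (List.replicate m [a, b]).flatten).take n) = pvAlt n a b
    match n with
    | 0 => rfl
    | 1 => rfl
    | n + 2 =>
      simp only [List.take_succ_cons, pvAlt]
      rw [ih n a b (by omega)]

-- equality with the ideal alternating list is the pvChk scan
theorem eq_alt_iff_chk (r : List Char) : ∀ x y,
    (decide (r = pvAlt r.length x y)) = pvChk x y r := by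
  induction r with
  | nil => intro x y; rfl
  | cons c r' ih =>
    intro x y
    show (decide (c :: r' = x :: pvAlt r'.length y x)) = ((c == x) && pvChk y x r')
    rw [← ih y x]
    by_cases hcx : c = x
    · subst hcx; simp
    · simp [hcx]

-- A's loop is the pvChk scan of the tail from index 2
theorem pvLoopA_eq_pvChk (r : List Char) : ∀ (l : List Char) (j : Nat) (a b : Char),
    l.drop j = r → 2 ≤ j →
    pvLoopA l a b (PySem.List.pyRange (j : Int) (l.length : Int) 1) =
      pvChk (if j % 2 = 0 then a else b) (if j % 2 = 0 then b else a) r := by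
  induction r with
  | nil =>
    intro l j a b hdrop _
    have hj : l.length ≤ j := by
      have := congrArg List.length hdrop
      simp at this
      omega
    rw [PySem.List.pyRange_one_eq_nil (by exact_mod_cast hj)]
    rfl
  | cons c r' ih =>
    intro l j a b hdrop hj2
    have hjlen : j < l.length := by
      have := congrArg List.length hdrop
      simp at this
      omega
    have hget : l[j]? = some c := by
      have : l[j]? = (l.drop j)[0]? := by
        simp [List.getElem?_drop]
      rw [this, hdrop]; rfl
    rw [PySem.List.pyRange_one_cons (by exact_mod_cast hjlen)]
    show pvLoopA l a b ((j : Int) :: PySem.List.pyRange ((j : Int) + 1) (l.length : Int) 1) = _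
    have hdrop' : l.drop (j + 1) = r' := by
      have : l.drop (j + 1) = (l.drop j).drop 1 := by
        rw [List.drop_drop]
      rw [this, hdrop]; rfl
    have hmod : PySem.Int.mod (j : Int) 2 = ((j % 2 : Nat) : Int) := by
      simp [pysem]
    have hrec := ih l (j + 1) a b hdrop' (by omega)
    have hcast : ((j : Int) + 1) = ((j + 1 : Nat) : Int) := by push_cast; ring
    unfold pvLoopA
    rw [PySem.List.pyGet?_natCast, hget]
    simp only [hmod, hcast]
    rcases Nat.even_or_odd j with he | ho
    · have h0 : j % 2 = 0 := Nat.even_iff.mp he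
      have h1 : (j + 1) % 2 = 1 := by omega
      by_cases hca : c = a
      · subst hca
        simp [h0, pvChk]
        rw [hcast, hrec]
        simp [h1]
      · have : (c != a) = true := by simp [hca]
        simp [h0, this, pvChk, hca]
    · have h1 : j % 2 = 1 := Nat.odd_iff.mp ho
      have h0 : (j + 1) % 2 = 0 := by omega
      by_cases hcb : c = b
      · subst hcb
        simp [h1, pvChk]
        rw [hcast, hrec]
        simp [h0]
      · have : (c != b) = true := by simp [hcb]
        simp [h1, this, pvChk, hcb]

theorem ports_agree (string : String) :
    is_a_valid_t_string string = is_a_valid_t_string_alt string := by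
  unfold is_a_valid_t_string is_a_valid_t_string_alt
  rcases hl : string.toList with _ | ⟨a, tl⟩
  · rfl
  rcases tl with _ | ⟨b, rest⟩
  · rfl
  have hlen : ¬ ((a :: b :: rest).length < 2) := by simp
  simp only [hlen, if_false]
  have h0 : PySem.List.pyGet? (a :: b :: rest) 0 = some a := by simp
  have h1 : PySem.List.pyGet? (a :: b :: rest) 1 = some b := by simp
  rw [h0, h1]
  by_cases hab : a = b
  · subst hab; simp
  · have hne : (a != b) = true := by simp [hab]
    have hbeq : (a == b) = false := by simp [hab]
    simp only [hne, if_true, hbeq, Bool.false_eq_true, if_false]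
    -- rewrite B's side into pvChk
    set n := (a :: b :: rest).length with hn
    have hn' : n = rest.length + 2 := by simp [hn]
    have htake : (a :: b :: rest).take 2 = [a, b] := rfl
    have hpat : ((List.replicate ((n + 1) / 2) ((a :: b :: rest).take 2)).flatten.take n)
        = pvAlt n a b := by
      rw [htake]
      exact pattern_take ((n + 1) / 2) n a b (by omega)
    have hbd : ∀ (x y : List Char), (x == y) = decide (x = y) := by
      intro x y; by_cases h : x = y <;> simp [h]
    have hB : ((a :: b :: rest) == ((List.replicate ((n + 1) / 2) ((a :: b :: rest).take 2)).flatten.take n))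
        = pvChk a b rest := by
      rw [hbd, hpat, hn']
      show decide (a :: b :: rest = a :: b :: pvAlt rest.length a b) = pvChk a b rest
      rw [← eq_alt_iff_chk rest a b]
      simp
    rw [hB]
    -- rewrite A's side into pvChk
    have hA := pvLoopA_eq_pvChk rest (a :: b :: rest) 2 a b (by rfl) (by omega)
    norm_num at hA
    rw [hn', show ((rest.length + 2 : Nat) : Int) = ((rest.length : Int) + 1 + 1) by push_cast; ring, hA]

-- ===== VERDICT (by name: the statement is the Claim_ definition above) =====
theorem is_a_valid_t_string_spec : Claim_equal_is_a_valid_t_string := by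
  intro string _
  exact ports_agree string
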